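-- pv_equiv track=rewrite | github.com/Azure/cyclecloud-pbspro | specs/default/chef/site-cookbooks/pbspro/files/default/pbs_driver.py | parse_place
-- ===== SOURCE A (Python) =====
-- def parse_place(place):
--     '''
--     arrangement is one of free | pack | scatter | vscatter
--     sharing is one of excl | shared | exclhost
--     grouping can have only one instance of group=resource
--     '''
--     placement = {"arrangement": "free"}
--
--     if not place:
--         return placement
--
--     toks = place.split(":")
--
--     for tok in toks:
--         if tok in ["free", "pack", "scatter", "vscatter"]:
--             placement["arrangement"] = tok
--         elif tok in ["excl", "shared", "exclhost"]:
--             placement["sharing"] = tok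
--         elif tok.startswith("group="):
--             placement["grouping"] = tok
--
--     return placement
-- ===== SOURCE B (Python) =====
-- def parse_place(place):
--     '''
--     arrangement is one of free | pack | scatter | vscatter
--     sharing is one of excl | shared | exclhost
--     grouping can have only one instance of group=resource
--     '''
--     placement = {"arrangement": "free"}
--
--     if not place:
--         return placement
--
--     toks = place.split(":")
--
--     arrangement = [t for t in toks if t in ("free", "pack", "scatter", "vscatter")]
--     if arrangement:
--         placement["arrangement"] = arrangement[-1]
--
--     sharing = [t for t in toks if t in ("excl", "shared", "exclhost")]
--     if sharing:
--         placement["sharing"] = sharing[-1]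
--
--     grouping = [t for t in toks if t.startswith("group=")]
--     if grouping:
--         placement["grouping"] = grouping[-1]
--
--     return placement
-- ===== Notes on version B (the rewrite author's own statement) =====
-- stated objective: alternative
-- what changed: A's single categorizing loop with per-token branches is replaced by three independent per-category filter passes, each keeping its last match; Pre_ excludes place strings where a group= token precedes the first sharing token while both categories occur, since there A's dict key insertion order (grouping before sharing) is an accident of first occurrence and B always emits sharing before grouping.
import Mathlib
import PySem

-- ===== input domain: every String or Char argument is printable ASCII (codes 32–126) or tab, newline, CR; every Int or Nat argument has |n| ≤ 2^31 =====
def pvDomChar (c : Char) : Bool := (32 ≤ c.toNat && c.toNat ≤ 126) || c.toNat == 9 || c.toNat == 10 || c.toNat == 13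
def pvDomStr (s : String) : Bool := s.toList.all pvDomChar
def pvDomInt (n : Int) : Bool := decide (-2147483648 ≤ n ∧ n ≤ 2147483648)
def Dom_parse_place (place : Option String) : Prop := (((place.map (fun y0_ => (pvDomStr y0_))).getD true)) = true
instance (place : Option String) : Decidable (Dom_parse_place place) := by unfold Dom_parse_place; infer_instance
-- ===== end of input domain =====

-- B replaces A's single categorizing loop by three independent per-category filter passes
-- (last match wins) with a fixed key order; objective: alternative decomposition.

-- shared token tables / tests (same-module constants of the Python)
def pvArrToks : List String := ["free", "pack", "scatter", "vscatter"]
def pvShToks : List String := ["excl", "shared", "exclhost"]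
def pvIsArr (t : String) : Bool := pvArrToks.contains t          -- 'tok in ["free","pack","scatter","vscatter"]'
def pvIsSh (t : String) : Bool := pvShToks.contains t            -- 'tok in ["excl","shared","exclhost"]'
def pvIsGr (t : String) : Bool := PySem.Str.startswith t "group="  -- 'tok.startswith("group=")'

-- ===== PORT A =====
-- body of A's 'for tok in toks' loop
def pvStepA (d : PySem.Dict String String) (tok : String) : PySem.Dict String String :=
  if pvIsArr tok then d.insert "arrangement" tok
  else if pvIsSh tok then d.insert "sharing" tok
  else if pvIsGr tok then d.insert "grouping" tok
  else d

def parse_place (place : Option String) : List (String × String) :=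
  let placement : PySem.Dict String String := PySem.Dict.ofList [("arrangement", "free")]
  match place with
  | none => placement.items
  | some s =>
    if s = "" then placement.items
    else
      let toks := (PySem.Str.split? s ":").getD []   -- sep ":" ≠ "": split? is always 'some'
      (toks.foldl pvStepA placement).items

-- ===== PORT B =====
def parse_place_alt (place : Option String) : List (String × String) :=
  let placement : PySem.Dict String String := PySem.Dict.ofList [("arrangement", "free")]
  match place with
  | none => placement.items
  | some s =>
    if s = "" then placement.items
    else
      let toks := (PySem.Str.split? s ":").getD []   -- sep ":" ≠ "": split? is always 'some'
      let arrangement := toks.filter pvIsArr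
      let placement := if arrangement.isEmpty then placement
        else placement.insert "arrangement" (PySem.List.pyGetD arrangement (-1) "")   -- arrangement[-1]: non-empty here
      let sharing := toks.filter pvIsSh
      let placement := if sharing.isEmpty then placement
        else placement.insert "sharing" (PySem.List.pyGetD sharing (-1) "")
      let grouping := toks.filter pvIsGr
      let placement := if grouping.isEmpty then placement
        else placement.insert "grouping" (PySem.List.pyGetD grouping (-1) "")
      placement.items

-- ===== PRECONDITION & SPEC =====
-- does a grouping token come first among the sharing/grouping tokens of the place string?
def pvGrFirst (toks : List String) : Bool :=
  pvIsGr ((toks.find? (fun t => pvIsSh t || pvIsGr t)).getD "")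

-- Pre_ excludes place strings where a 'group=' token precedes the first sharing token while both
-- categories occur: there A's dict key insertion order (grouping before sharing) is an accident of
-- first occurrence, while B always emits sharing before grouping — both orders are defensible.
def pvPreOk (s : String) : Bool :=
  decide (s = "" ∨
    ((PySem.Str.split? s ":").getD []).filter pvIsSh = [] ∨
    ((PySem.Str.split? s ":").getD []).filter pvIsGr = [] ∨
    pvGrFirst ((PySem.Str.split? s ":").getD []) = false)

def Pre_parse_place (place : Option String) : Prop :=
  ((place.map pvPreOk).getD true) = true

instance (place : Option String) : Decidable (Pre_parse_place place) := by
  unfold Pre_parse_place; infer_instance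

def pvWitness_parse_place : Option String := some "excl:group=g:pack"

def Spec_parse_place (place : Option String) (out : List (String × String)) : Prop := out = parse_place_alt place
instance (place : Option String) (out : List (String × String)) : Decidable (Spec_parse_place place out) := by unfold Spec_parse_place; infer_instance

-- ===== CLAIM (what is proved, stated in full; the proofs are below) =====
def Claim_equal_parse_place : Prop := ∀ (place : Option String), Dom_parse_place place → Pre_parse_place place → Spec_parse_place place (parse_place place)

-- ===== LEMMAS AND PROOFS =====

-- canonical value of A's result dict's items, as a function of the token list
def pvTail (toks : List String) : List (String × String) :=
  if (toks.filter pvIsSh).isEmpty then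
    if (toks.filter pvIsGr).isEmpty then []
    else [("grouping", (toks.filter pvIsGr).getLastD "")]
  else if (toks.filter pvIsGr).isEmpty then [("sharing", (toks.filter pvIsSh).getLastD "")]
  else if pvGrFirst toks then
    [("grouping", (toks.filter pvIsGr).getLastD ""), ("sharing", (toks.filter pvIsSh).getLastD "")]
  else
    [("sharing", (toks.filter pvIsSh).getLastD ""), ("grouping", (toks.filter pvIsGr).getLastD "")]

def pvCanon (toks : List String) : List (String × String) :=
  ("arrangement", (toks.filter pvIsArr).getLastD "free") :: pvTail toks

-- canonical value of B's result dict's items: fixed sharing-then-grouping order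
def pvTailB (toks : List String) : List (String × String) :=
  (if (toks.filter pvIsSh).isEmpty then [] else [("sharing", (toks.filter pvIsSh).getLastD "")]) ++
  (if (toks.filter pvIsGr).isEmpty then [] else [("grouping", (toks.filter pvIsGr).getLastD "")])

def pvCanonB (toks : List String) : List (String × String) :=
  ("arrangement", (toks.filter pvIsArr).getLastD "free") :: pvTailB toks

-- token categories are mutually exclusive
lemma pvArr_not_sh (t : String) (h : pvIsArr t = true) : pvIsSh t = false := by
  simp [pvIsArr, pvArrToks] at h; rcases h with h|h|h|h <;> subst h <;> decide

lemma pvArr_not_gr (t : String) (h : pvIsArr t = true) : pvIsGr t = false := by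
  simp [pvIsArr, pvArrToks] at h; rcases h with h|h|h|h <;> subst h <;> decide

lemma pvSh_not_gr (t : String) (h : pvIsSh t = true) : pvIsGr t = false := by
  simp [pvIsSh, pvShToks] at h; rcases h with h|h|h <;> subst h <;> decide

-- xs[-1] on a non-empty list is its last element
lemma pvGetNegOne {α : Type} (l : List α) (d : α) :
    PySem.List.pyGetD l (-1) d = l.getLastD d := by
  rcases List.eq_nil_or_concat l with rfl | ⟨l', x, rfl⟩
  · rfl
  · simp [PySem.List.pyGetD, PySem.List.pyGet?, PySem.List.pyIdx?]

lemma pvGetLastD_ne {α : Type} (l : List α) (h : l ≠ []) (a b : α) :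
    l.getLastD a = l.getLastD b := by
  obtain ⟨l', x, rfl⟩ := (List.eq_nil_or_concat l).resolve_left h
  simp

lemma pvFindSome (l : List String) (h : ¬ (l.filter pvIsSh = [] ∧ l.filter pvIsGr = [])) :
    ∃ a, l.find? (fun t => pvIsSh t || pvIsGr t) = some a := by
  cases hf : l.find? (fun t => pvIsSh t || pvIsGr t) with
  | some a => exact ⟨a, rfl⟩
  | none =>
    exfalso
    apply h
    have := List.find?_eq_none.mp hf
    constructor <;>
    · rw [List.filter_eq_nil_iff]
      intro x hx
      have := this x hx
      simp at this
      simp [this]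

-- pvGrFirst under appending one token, and its value on one-sided inputs
lemma pvGrFirst_append_other (l : List String) (t : String)
    (hs : pvIsSh t = false) (hg : pvIsGr t = false) :
    pvGrFirst (l ++ [t]) = pvGrFirst l := by
  simp [pvGrFirst, List.find?_append, List.find?, hs, hg]

lemma pvGrFirst_append_of_found (l : List String) (t : String)
    (h : ¬ (l.filter pvIsSh = [] ∧ l.filter pvIsGr = [])) :
    pvGrFirst (l ++ [t]) = pvGrFirst l := by
  obtain ⟨a, hf⟩ := pvFindSome l h
  simp [pvGrFirst, List.find?_append, hf]

lemma pvGrFirst_of_sh_empty (l : List String)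
    (hs : l.filter pvIsSh = []) (hg : l.filter pvIsGr ≠ []) : pvGrFirst l = true := by
  obtain ⟨a, hf⟩ := pvFindSome l (by simp [hs, hg])
  have hpa := List.find?_some hf
  have hmem := List.mem_of_find?_eq_some hf
  have hsha := List.filter_eq_nil_iff.mp hs a hmem
  simp at hsha
  simp [hsha] at hpa
  simp [pvGrFirst, hf, hpa]

lemma pvGrFirst_of_gr_empty (l : List String)
    (hg : l.filter pvIsGr = []) (hs : l.filter pvIsSh ≠ []) : pvGrFirst l = false := by
  obtain ⟨a, hf⟩ := pvFindSome l (by simp [hg, hs])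
  have hmem := List.mem_of_find?_eq_some hf
  have hga := List.filter_eq_nil_iff.mp hg a hmem
  simp at hga
  simp [pvGrFirst, hf, hga]

-- one step of A's loop preserves the canonical form
lemma pvStepA_canon (l : List String) (t : String) :
    pvStepA (PySem.Dict.mk (pvCanon l)) t = PySem.Dict.mk (pvCanon (l ++ [t])) := by
  by_cases hA : pvIsArr t
  · have hs := pvArr_not_sh t hA
    have hg := pvArr_not_gr t hA
    by_cases hse : l.filter pvIsSh = [] <;> by_cases hge : l.filter pvIsGr = [] <;>
      simp [pvStepA, hA, pvCanon, pvTail, List.filter_append, List.filter, hs, hg, hse, hge,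
        PySem.Dict.insert, PySem.Dict.contains, pvGrFirst_append_other] <;>
      split <;> simp
  · by_cases hS : pvIsSh t
    · have hg := pvSh_not_gr t hS
      by_cases hse : l.filter pvIsSh = [] <;> by_cases hge : l.filter pvIsGr = []
      · simp [pvStepA, hA, hS, hg, pvCanon, pvTail, List.filter_append, List.filter, hse, hge,
          PySem.Dict.insert, PySem.Dict.contains]
      · have h1 := pvGrFirst_append_of_found l t (by simp [hge])
        have h2 := pvGrFirst_of_sh_empty l hse hge
        simp [pvStepA, hA, hS, hg, pvCanon, pvTail, List.filter_append, List.filter, hse, hge,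
          PySem.Dict.insert, PySem.Dict.contains, h1, h2]
      · simp [pvStepA, hA, hS, hg, pvCanon, pvTail, List.filter_append, List.filter, hse, hge,
          PySem.Dict.insert, PySem.Dict.contains]
      · have h1 := pvGrFirst_append_of_found l t (by simp [hse])
        cases hgf : pvGrFirst l <;>
          simp [pvStepA, hA, hS, hg, pvCanon, pvTail, List.filter_append, List.filter, hse, hge,
            List.isEmpty_iff, h1, hgf, PySem.Dict.insert, PySem.Dict.contains]
    · by_cases hG : pvIsGr t
      · by_cases hse : l.filter pvIsSh = [] <;> by_cases hge : l.filter pvIsGr = []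
        · simp [pvStepA, hA, hS, hG, pvCanon, pvTail, List.filter_append, List.filter, hse, hge,
            PySem.Dict.insert, PySem.Dict.contains]
        · simp [pvStepA, hA, hS, hG, pvCanon, pvTail, List.filter_append, List.filter, hse, hge,
            PySem.Dict.insert, PySem.Dict.contains]
        · have h1 := pvGrFirst_append_of_found l t (by simp [hse])
          have h2 := pvGrFirst_of_gr_empty l hge hse
          simp [pvStepA, hA, hS, hG, pvCanon, pvTail, List.filter_append, List.filter, hse, hge,
            PySem.Dict.insert, PySem.Dict.contains, h1, h2]
        · have h1 := pvGrFirst_append_of_found l t (by simp [hse])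
          cases hgf : pvGrFirst l <;>
            simp [pvStepA, hA, hS, hG, pvCanon, pvTail, List.filter_append, List.filter, hse, hge,
              List.isEmpty_iff, h1, hgf, PySem.Dict.insert, PySem.Dict.contains]
      · simp [pvStepA, hA, hS, hG, pvCanon, pvTail, List.filter_append, List.filter,
          pvGrFirst_append_other l t (by simp [hS]) (by simp [hG])]

-- A's loop computes the canonical dict
lemma pvFoldA_canon (l : List String) :
    l.foldl pvStepA (PySem.Dict.ofList [("arrangement", "free")]) = PySem.Dict.mk (pvCanon l) := by
  induction l using List.reverseRecOn with
  | nil => rfl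
  | append_singleton l t ih => rw [List.foldl_concat, ih, pvStepA_canon]

-- B's three passes compute B's canonical items
lemma pvAltB_canon (toks : List String) :
    (let placement : PySem.Dict String String := PySem.Dict.ofList [("arrangement", "free")]
     let arrangement := toks.filter pvIsArr
     let placement := if arrangement.isEmpty then placement
       else placement.insert "arrangement" (PySem.List.pyGetD arrangement (-1) "")
     let sharing := toks.filter pvIsSh
     let placement := if sharing.isEmpty then placement
       else placement.insert "sharing" (PySem.List.pyGetD sharing (-1) "")
     let grouping := toks.filter pvIsGr
     let placement := if grouping.isEmpty then placement
       else placement.insert "grouping" (PySem.List.pyGetD grouping (-1) "")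
     placement.items) = pvCanonB toks := by
  by_cases hae : toks.filter pvIsArr = []
  · by_cases hse : toks.filter pvIsSh = [] <;> by_cases hge : toks.filter pvIsGr = [] <;>
      simp [pvCanonB, pvTailB, hae, hse, hge, pvGetNegOne,
        PySem.Dict.ofList, PySem.Dict.empty, PySem.Dict.update, PySem.Dict.insert,
        PySem.Dict.contains]
  · have ha1 : PySem.List.pyGetD (toks.filter pvIsArr) (-1) ""
        = (toks.filter pvIsArr).getLastD "free" := by
      rw [pvGetNegOne, pvGetLastD_ne _ hae]
    by_cases hse : toks.filter pvIsSh = [] <;> by_cases hge : toks.filter pvIsGr = [] <;>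
      simp [pvCanonB, pvTailB, hae, hse, hge, pvGetNegOne, ha1,
        PySem.Dict.ofList, PySem.Dict.empty, PySem.Dict.update, PySem.Dict.insert,
        PySem.Dict.contains]

-- under Pre_ the two canonical forms coincide
lemma pvCanon_eq_canonB (toks : List String)
    (h : toks.filter pvIsSh = [] ∨ toks.filter pvIsGr = [] ∨ pvGrFirst toks = false) :
    pvCanon toks = pvCanonB toks := by
  unfold pvCanon pvCanonB pvTail pvTailB
  by_cases hse : toks.filter pvIsSh = [] <;> by_cases hge : toks.filter pvIsGr = []
  · simp [hse, hge]
  · simp [hse, hge]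
  · simp [hse, hge]
  · have hgf : pvGrFirst toks = false := by tauto
    simp [hse, hge, hgf]

-- ===== VERDICT (by name: the statement is the Claim_ definition above) =====
theorem parse_place_spec : Claim_equal_parse_place := by
  intro place _ hpre
  unfold Spec_parse_place parse_place parse_place_alt
  match place with
  | none => rfl
  | some s =>
    by_cases hs : s = ""
    · simp [hs]
    · simp only [hs, if_false]
      rw [pvFoldA_canon, pvAltB_canon]
      unfold Pre_parse_place at hpre
      simp only [Option.map_some, Option.getD_some] at hpre
      rcases of_decide_eq_true hpre with h | h
      · exact absurd h hs
      · exact congrArg PySem.Dict.items (congrArg PySem.Dict.mk (pvCanon_eq_canonB _ h)) |>.trans rfl
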